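-- pv_equiv track=rewrite | github.com/nat1881/variantize | variantize.py | vowel_replace
-- ===== SOURCE A (Python) =====
-- def split_vow(word):
--     substrings = []
--     skip = False
--     for index, letter in enumerate(word):
--         if skip is True:
--             skip = False
--             continue
--         elif index < len(word) - 1:
--             pair = letter + word[index + 1]
--             if letter + word[index + 1] in vowel_rules:
--                 substrings.append(pair)
--                 skip = True
--             elif letter in vowel_rules:
--                 substrings.append(letter)
--             else:
--                 substrings.append((letter,))
--         elif letter in vowel_rules:
--             substrings.append(letter)
--         else:
--             substrings.append((letter,))
--     return substrings
--
-- def product(*args, repeat=1):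
--     pools = [tuple(pool) for pool in args] * repeat
--     result = [[]]
--     for pool in pools:
--         result = [x+[y] for x in result for y in pool]
--     for prod in result[:50]:
--         yield tuple(prod)
--
-- vowel_rules = {"ai":["ai","a","ae", "e", "ee", "ei", "oi", "at", "ad", "es"],
--             "au":["au","a"],
--             "e":["e","a","ay", "ea", "ee", "ei", "ey", "e", "et", "y", "ie", "o", "u","ed", "ou"],
--             "o":["o","a", "e", "ou", "u", "oe", "os"],
--             "a":["a","ai","ay","au", "aau", "e", "o", "at"],
--             "ei":["ei","e", "i", "ie", "oy", "oi"],
--             "eu":["eu","e", "iw", "ou", "u", "uu", "ol"],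
--             "i":["i","e", "ee", "ey", "y"],
--             "ie":["ie","e", "ee", "ei", "i", "y",],
--             "ieu":["ieu","e", "iu", "eu", "u"],
--             "oi":["oi","ai","e","i","o", "u", "ei"],
--             "ue":["ue","e","eo", "o", "oe", "u", "we"],
--             "ae":["ae","ey"],
--             "ui":["ui","i","y", "u", "oi", "oy"],
--             "ou":["ou","o", "ol", "u"],
--             "u":["u","ou","ow", "uu", "yw", "w",],
--             "oir":["oir","eir"],
--             "onner":["onner","uner"],
--             "eur": ["eur", "ur"],
--             "y": ["y", "i"],
--             "uv":["uv","o"],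
--             "ais":["ais","ois"],
--             "our":["our","or"],
--             "sur":["sur","sor"],
--             "nie":["nie","ne"],
--             "ous":["ous", "o"],
--             "aim":["aim","am"],
--             "on": ["on", "un"],
--             "er": ["er", "e"],
--             "ge":["ge", "gie"],
--             "en":["en", "on", "a"],
--             "ea":["ea","oya"],
--             "un":["un", "om", "on"],
--             "ua":["ua", "e"],
--             "ain":["ain", "ein"],
--             "es":["es", "ant"],
--             "em":["em", "a"],
--             }
--
-- def vowel_replace(word):
--     combos = []
--     for spli in split_vow(word):
--         if spli in vowel_rules:
--             combos += [vowel_rules[spli]]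
--         else:
--             combos += (spli,)
--     return (''.join(o) for o in product(*combos))
-- ===== SOURCE B (Python) =====
-- # The replacement table, encoded as one spec string: "key v1 v2 ...;key v1 ...".
-- _SPEC = ["ai ai a ae e ee ei oi at ad es",
--          "au au a",
--          "e e a ay ea ee ei ey e et y ie o u ed ou",
--          "o o a e ou u oe os",
--          "a a ai ay au aau e o at",
--          "ei ei e i ie oy oi",
--          "eu eu e iw ou u uu ol",
--          "i i e ee ey y",
--          "ie ie e ee ei i y",
--          "ieu ieu e iu eu u",
--          "oi oi ai e i o u ei",
--          "ue ue e eo o oe u we",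
--          "ae ae ey",
--          "ui ui i y u oi oy",
--          "ou ou o ol u",
--          "u u ou ow uu yw w",
--          "oir oir eir",
--          "onner onner uner",
--          "eur eur ur",
--          "y y i",
--          "uv uv o",
--          "ais ais ois",
--          "our our or",
--          "sur sur sor",
--          "nie nie ne",
--          "ous ous o",
--          "aim aim am",
--          "on on un",
--          "er er e",
--          "ge ge gie",
--          "en en on a",
--          "ea ea oya",
--          "un un om on",
--          "ua ua e",
--          "ain ain ein",
--          "es es ant",
--          "em em a"]
--
-- _RULES = {}
-- for _line in _SPEC:
--     _parts = _line.split(" ")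
--     _RULES[_parts[0]] = _parts[1:]
--
--
-- def vowel_replace(word):
--     # one greedy left-to-right pass builds the pools directly
--     pools = []
--     i = 0
--     while i < len(word):
--         two = word[i:i + 2]
--         if len(two) == 2 and two in _RULES:
--             pools.append(_RULES[two])
--             i += 2
--         elif word[i] in _RULES:
--             pools.append(_RULES[word[i]])
--             i += 1
--         else:
--             pools.append([word[i]])
--             i += 1
--
--     def gen():
--         # suffix weights, right-to-left, capped at 50: only indices i < 50 are
--         # ever decoded, so a weight >= 50 acts exactly like the true weight
--         w = 1
--         rweights = []
--         for pool in reversed(pools):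
--             rweights.append(w)
--             w = min(50, w * len(pool))
--         weights = list(reversed(rweights))
--         for idx in range(min(50, w)):
--             yield ''.join(pool[(idx // wj) % len(pool)]
--                           for pool, wj in zip(pools, weights))
--
--     return gen()
-- ===== Notes on version B (the rewrite author's own statement) =====
-- stated objective: alternative
-- what changed: B merges A's two staged passes (split_vow tagging then the combos loop) into one greedy left-to-right tokenizer that emits pools directly, keeps the rules table as parsed spec lines instead of a dict literal, and replaces A's full materialization of the cartesian product (built before the [:50] cap) by mixed-radix index unranking with suffix weights capped at 50, so at most 50 variants are ever built (A materializes the whole product first).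
import Mathlib
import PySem

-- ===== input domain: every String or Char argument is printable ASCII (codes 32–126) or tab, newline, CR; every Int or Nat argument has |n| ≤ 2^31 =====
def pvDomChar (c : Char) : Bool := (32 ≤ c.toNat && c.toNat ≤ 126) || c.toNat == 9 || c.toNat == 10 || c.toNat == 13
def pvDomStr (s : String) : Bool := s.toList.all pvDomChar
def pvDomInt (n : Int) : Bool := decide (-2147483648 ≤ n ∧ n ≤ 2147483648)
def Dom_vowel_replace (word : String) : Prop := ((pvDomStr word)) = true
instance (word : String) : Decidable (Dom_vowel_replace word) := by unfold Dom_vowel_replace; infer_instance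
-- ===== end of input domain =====

-- B replaces A's two staged passes (split_vow tags, then the combos loop, then a fully
-- materialized cartesian product cut at [:50]) by a single greedy tokenizer that emits the
-- pools directly and a mixed-radix unranking of only the first min(50, total) variants.
-- Python A returns a generator; the equivalence here is about the list of values it yields.

-- ===== PORT A =====
-- the module-level vowel_rules dict of A's source
def vowelRules : PySem.Dict String (List String) := PySem.Dict.mk
  [("ai", ["ai","a","ae","e","ee","ei","oi","at","ad","es"]),
   ("au", ["au","a"]),
   ("e", ["e","a","ay","ea","ee","ei","ey","e","et","y","ie","o","u","ed","ou"]),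
   ("o", ["o","a","e","ou","u","oe","os"]),
   ("a", ["a","ai","ay","au","aau","e","o","at"]),
   ("ei", ["ei","e","i","ie","oy","oi"]),
   ("eu", ["eu","e","iw","ou","u","uu","ol"]),
   ("i", ["i","e","ee","ey","y"]),
   ("ie", ["ie","e","ee","ei","i","y"]),
   ("ieu", ["ieu","e","iu","eu","u"]),
   ("oi", ["oi","ai","e","i","o","u","ei"]),
   ("ue", ["ue","e","eo","o","oe","u","we"]),
   ("ae", ["ae","ey"]),
   ("ui", ["ui","i","y","u","oi","oy"]),
   ("ou", ["ou","o","ol","u"]),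
   ("u", ["u","ou","ow","uu","yw","w"]),
   ("oir", ["oir","eir"]),
   ("onner", ["onner","uner"]),
   ("eur", ["eur","ur"]),
   ("y", ["y","i"]),
   ("uv", ["uv","o"]),
   ("ais", ["ais","ois"]),
   ("our", ["our","or"]),
   ("sur", ["sur","sor"]),
   ("nie", ["nie","ne"]),
   ("ous", ["ous","o"]),
   ("aim", ["aim","am"]),
   ("on", ["on","un"]),
   ("er", ["er","e"]),
   ("ge", ["ge","gie"]),
   ("en", ["en","on","a"]),
   ("ea", ["ea","oya"]),
   ("un", ["un","om","on"]),
   ("ua", ["ua","e"]),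
   ("ain", ["ain","ein"]),
   ("es", ["es","ant"]),
   ("em", ["em","a"])]

-- split_vow; Sum.inl = a key string appended, Sum.inr = the tuple (letter,).
-- The enumerate/skip loop is transcribed as recursion: the 'skip = True' branch consumes two characters.
def splitVow : List Char → List (String ⊕ String)
  | [] => []
  | [c] =>
      if (vowelRules.get? (String.ofList [c])).isSome then [Sum.inl (String.ofList [c])]
      else [Sum.inr (String.ofList [c])]
  | c1 :: c2 :: rest =>
      if (vowelRules.get? (String.ofList [c1, c2])).isSome then Sum.inl (String.ofList [c1, c2]) :: splitVow rest
      else if (vowelRules.get? (String.ofList [c1])).isSome then Sum.inl (String.ofList [c1]) :: splitVow (c2 :: rest)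
      else Sum.inr (String.ofList [c1]) :: splitVow (c2 :: rest)

-- A's combos-building loop:
-- 'if spli in vowel_rules: combos += [vowel_rules[spli]] else: combos += (spli,)'
def combosOf (word : String) : List (List String) :=
  (splitVow word.toList).foldl (fun acc spli =>
    match spli with
    | Sum.inl k =>
        match vowelRules.get? k with
        | some v => acc ++ [v]
        | none => acc ++ [[k]]
    | Sum.inr c => acc ++ [[c]]) []

-- A: product() materializes the whole cartesian product, then result[:50], then ''.join each
def vowel_replace (word : String) : List String :=
  let combos := combosOf word
  let result := combos.foldl (fun r pool => r.flatMap (fun x => pool.map (fun y => x ++ [y]))) [[]]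
  (result.take 50).map (fun o => PySem.Str.join "" o)

-- ===== PORT B =====
-- B's rules table: spec lines "key v1 v2 …", parsed once into a dict
def rulesSpec : List String :=
  ["ai ai a ae e ee ei oi at ad es",
   "au au a",
   "e e a ay ea ee ei ey e et y ie o u ed ou",
   "o o a e ou u oe os",
   "a a ai ay au aau e o at",
   "ei ei e i ie oy oi",
   "eu eu e iw ou u uu ol",
   "i i e ee ey y",
   "ie ie e ee ei i y",
   "ieu ieu e iu eu u",
   "oi oi ai e i o u ei",
   "ue ue e eo o oe u we",
   "ae ae ey",
   "ui ui i y u oi oy",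
   "ou ou o ol u",
   "u u ou ow uu yw w",
   "oir oir eir",
   "onner onner uner",
   "eur eur ur",
   "y y i",
   "uv uv o",
   "ais ais ois",
   "our our or",
   "sur sur sor",
   "nie nie ne",
   "ous ous o",
   "aim aim am",
   "on on un",
   "er er e",
   "ge ge gie",
   "en en on a",
   "ea ea oya",
   "un un om on",
   "ua ua e",
   "ain ain ein",
   "es es ant",
   "em em a"]

def parseLine (line : String) : String × List String :=
  match (PySem.Str.split? line " ").getD [] with
  | k :: vs => (k, vs)
  | [] => ("", [])

def rulesB : PySem.Dict String (List String) :=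
  PySem.Dict.mk (rulesSpec.map parseLine)

-- the greedy one-pass tokenizer of Source B (while-loop over i → recursion on the characters)
def poolsB : List Char → List (List String)
  | [] => []
  | [c] =>
      match rulesB.get? (String.ofList [c]) with
      | some v => [v]
      | none => [[String.ofList [c]]]
  | c1 :: c2 :: rest =>
      match rulesB.get? (String.ofList [c1, c2]) with
      | some v => v :: poolsB rest
      | none =>
          match rulesB.get? (String.ofList [c1]) with
          | some v => v :: poolsB (c2 :: rest)
          | none => [String.ofList [c1]] :: poolsB (c2 :: rest)

-- B: suffix weights right-to-left, capped at 50 (only indices i < 50 are ever decoded,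
-- so a weight ≥ 50 behaves exactly like the true weight); then each index is decoded
-- digit by digit and the parts joined.
def vowel_replace_alt (word : String) : List String :=
  let pools := poolsB word.toList
  let st := pools.reverse.foldl (fun (st : Nat × List Nat) pool =>
      (min 50 (st.1 * pool.length), st.2 ++ [st.1])) (1, ([] : List Nat))
  let weights := st.2.reverse
  (List.range (min 50 st.1)).map (fun i =>
    PySem.Str.join "" ((pools.zip weights).map
      (fun pw => pw.1.getD ((i / pw.2) % pw.1.length) "")))

-- ===== PRECONDITION & SPEC =====
def Spec_vowel_replace (word : String) (out : List String) : Prop := out = vowel_replace_alt word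
instance (word : String) (out : List String) : Decidable (Spec_vowel_replace word out) := by unfold Spec_vowel_replace; infer_instance

-- ===== CLAIM (what is proved, stated in full; the proofs are below) =====
def Claim_equal_vowel_replace : Prop := ∀ (word : String), Dom_vowel_replace word → Spec_vowel_replace word (vowel_replace word)

-- ===== LEMMAS AND PROOFS =====

-- B's parsed table is A's table
set_option maxRecDepth 40000 in
set_option maxHeartbeats 1000000 in
theorem rulesB_eq : rulesB = vowelRules := by decide

-- A's combos loop as a map
def poolOfSplit (spli : String ⊕ String) : List String :=
  match spli with
  | Sum.inl k =>
      match vowelRules.get? k with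
      | some v => v
      | none => [k]
  | Sum.inr c => [c]

theorem foldl_append_map (l : List (String ⊕ String)) (acc : List (List String)) :
    l.foldl (fun acc spli =>
      match spli with
      | Sum.inl k =>
          match vowelRules.get? k with
          | some v => acc ++ [v]
          | none => acc ++ [[k]]
      | Sum.inr c => acc ++ [[c]]) acc = acc ++ l.map poolOfSplit := by
  induction l generalizing acc with
  | nil => simp
  | cons s l ih =>
      simp only [List.foldl_cons, List.map_cons]
      rw [ih]
      match s with
      | Sum.inl k =>
          simp only [poolOfSplit]
          cases vowelRules.get? k <;> simp
      | Sum.inr c => simp [poolOfSplit]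

theorem combosOf_eq_map (word : String) :
    combosOf word = (splitVow word.toList).map poolOfSplit := by
  unfold combosOf; rw [foldl_append_map]; simp

-- B's greedy pass produces exactly A's pools
theorem poolsB_eq_combos (cs : List Char) :
    poolsB cs = (splitVow cs).map poolOfSplit := by
  induction cs using splitVow.induct with
  | case1 => simp [poolsB, splitVow]
  | case2 c h =>
      simp only [poolsB, splitVow, if_pos h, rulesB_eq]
      obtain ⟨v, hv⟩ := Option.isSome_iff_exists.mp h
      simp [poolOfSplit, hv]
  | case3 c h =>
      simp only [poolsB, splitVow, if_neg h, rulesB_eq]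
      rw [Option.not_isSome_iff_eq_none] at h
      simp [poolOfSplit, h]
  | case4 c1 c2 rest h ih =>
      simp only [poolsB, splitVow, if_pos h, rulesB_eq]
      obtain ⟨v, hv⟩ := Option.isSome_iff_exists.mp h
      simp [poolOfSplit, hv, ih]
  | case5 c1 c2 rest h h1 ih =>
      simp only [poolsB, splitVow, if_neg h, if_pos h1, rulesB_eq]
      rw [Option.not_isSome_iff_eq_none] at h
      obtain ⟨v, hv⟩ := Option.isSome_iff_exists.mp h1
      simp [poolOfSplit, h, hv, ih]
  | case6 c1 c2 rest h h1 ih =>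
      simp only [poolsB, splitVow, if_neg h, if_neg h1, rulesB_eq]
      rw [Option.not_isSome_iff_eq_none] at h
      rw [Option.not_isSome_iff_eq_none] at h1
      simp [poolOfSplit, h, h1, ih]

def poolsProd (ps : List (List String)) : Nat := (ps.map List.length).prod

def unrank : List (List String) → Nat → List String
  | [], _ => []
  | p :: ps, i => p.getD ((i / poolsProd ps) % p.length) "" :: unrank ps i

theorem poolsProd_nil : poolsProd [] = 1 := rfl

theorem poolsProd_cons (p : List String) (ps : List (List String)) :
    poolsProd (p :: ps) = p.length * poolsProd ps := by
  simp [poolsProd]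

theorem poolsProd_pos (ps : List (List String)) (h : ∀ p ∈ ps, p ≠ []) :
    0 < poolsProd ps := by
  induction ps with
  | nil => simp [poolsProd]
  | cons p ps ih =>
      rw [poolsProd_cons]
      have hlp : 0 < p.length := List.length_pos_iff.mpr (h p (by simp))
      exact Nat.mul_pos hlp (ih (fun q hq => h q (by simp [hq])))

theorem step_length (r : List (List String)) (p : List String) :
    (r.flatMap (fun x => p.map (fun y => x ++ [y]))).length = r.length * p.length := by
  induction r with
  | nil => simp
  | cons x r ih => simp [ih, Nat.succ_mul, Nat.add_comm]

theorem cart_length (ps : List (List String)) : ∀ r : List (List String),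
    (ps.foldl (fun r pool => r.flatMap (fun x => pool.map (fun y => x ++ [y]))) r).length
      = r.length * poolsProd ps := by
  induction ps with
  | nil => intro r; simp [poolsProd]
  | cons p ps ih =>
      intro r
      simp only [List.foldl_cons]
      rw [ih, step_length, poolsProd_cons]
      ring

theorem flatMap_get (p : List String) :
    ∀ (r : List (List String)) (q s : Nat), q < r.length → s < p.length →
    (r.flatMap (fun x => p.map (fun y => x ++ [y])))[q * p.length + s]? =
      some (r.getD q [] ++ [p.getD s ""]) := by
  intro r
  induction r with
  | nil => intro q s hq hs; simp at hq
  | cons x r ih =>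
      intro q s hq hs
      cases q with
      | zero =>
          simp only [Nat.zero_mul, Nat.zero_add, List.flatMap_cons]
          rw [List.getElem?_append_left (by simpa using hs)]
          simp [List.getElem?_map, List.getElem?_eq_getElem hs]
      | succ q =>
          have hq' : q < r.length := by simpa using hq
          have harith : (q + 1) * p.length + s = p.length + (q * p.length + s) := by ring
          simp only [List.flatMap_cons, harith]
          rw [List.getElem?_append_right (by simp)]
          simpa using ih q s hq' hs

theorem unrank_add_mul (ps : List (List String)) (h : ∀ p ∈ ps, p ≠ []) :
    ∀ a k : Nat, unrank ps (a + k * poolsProd ps) = unrank ps a := by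
  induction ps with
  | nil => intro a k; simp [unrank]
  | cons p ps ih =>
      intro a k
      have hP : 0 < poolsProd ps := poolsProd_pos ps (fun q hq => h q (by simp [hq]))
      have hrw : a + k * poolsProd (p :: ps) = a + k * p.length * poolsProd ps := by
        rw [poolsProd_cons]; ring
      rw [hrw]
      simp only [unrank]
      congr 1
      · rw [Nat.add_mul_div_right _ _ hP, Nat.add_mul_mod_self_right]
      · exact ih (fun q hq => h q (by simp [hq])) a (k * p.length)

theorem unrank_mod (ps : List (List String)) (h : ∀ p ∈ ps, p ≠ []) (a : Nat) :
    unrank ps (a % poolsProd ps) = unrank ps a := by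
  conv_rhs => rw [← Nat.mod_add_div a (poolsProd ps)]
  rw [show a % poolsProd ps + poolsProd ps * (a / poolsProd ps)
        = a % poolsProd ps + (a / poolsProd ps) * poolsProd ps by ring]
  rw [unrank_add_mul ps h]

theorem cart_get (ps : List (List String)) :
    ∀ (r : List (List String)) (i : Nat), (∀ p ∈ ps, p ≠ []) → i < r.length * poolsProd ps →
    (ps.foldl (fun r pool => r.flatMap (fun x => pool.map (fun y => x ++ [y]))) r)[i]? =
      some (r.getD (i / poolsProd ps) [] ++ unrank ps (i % poolsProd ps)) := by
  induction ps with
  | nil =>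
      intro r i _ hi
      simp only [poolsProd_nil, Nat.mul_one] at hi
      simp [unrank, poolsProd_nil, Nat.div_one, List.getElem?_eq_getElem hi]
  | cons p ps ih =>
      intro r i hne hi
      have hp : p ≠ [] := hne p (by simp)
      have hl : 0 < p.length := List.length_pos_iff.mpr hp
      have hP : 0 < poolsProd ps := poolsProd_pos ps (fun q hq => hne q (by simp [hq]))
      have hne' : ∀ q ∈ ps, q ≠ [] := fun q hq => hne q (by simp [hq])
      simp only [List.foldl_cons]
      set r' := r.flatMap (fun x => p.map (fun y => x ++ [y])) with hr'
      have hlen : r'.length = r.length * p.length := step_length r p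
      have hi' : i < r'.length * poolsProd ps := by
        rw [hlen, Nat.mul_assoc]
        simpa [poolsProd_cons] using hi
      rw [ih r' i hne' hi']
      have hqlt : i / poolsProd ps < r'.length := Nat.div_lt_of_lt_mul (by rwa [Nat.mul_comm] at hi')
      set j := i / poolsProd ps with hj
      have hflat := flatMap_get p r (j / p.length) (j % p.length)
        (by
          apply Nat.div_lt_of_lt_mul
          rw [Nat.mul_comm]
          rwa [hlen] at hqlt)
        (Nat.mod_lt _ hl)
      rw [Nat.div_add_mod'] at hflat
      have hgetD : r'.getD j [] = r.getD (j / p.length) [] ++ [p.getD (j % p.length) ""] := by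
        rw [List.getD_eq_getElem r' [] hqlt]
        rw [← hr'] at hflat
        rw [List.getElem?_eq_getElem hqlt] at hflat
        exact Option.some.inj hflat
      have hdd : i / poolsProd (p :: ps) = j / p.length := by
        rw [hj, Nat.div_div_eq_div_mul, poolsProd_cons, Nat.mul_comm p.length (poolsProd ps)]
      have hmod1 : i % poolsProd (p :: ps) / poolsProd ps % p.length = j % p.length := by
        rw [poolsProd_cons, Nat.mul_comm p.length, Nat.mod_mul_right_div_self, hj]
        exact Nat.mod_mod_of_dvd _ dvd_rfl
      have hmod2 : i % poolsProd (p :: ps) % poolsProd ps = i % poolsProd ps := by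
        rw [poolsProd_cons, Nat.mul_comm p.length]
        exact Nat.mod_mul_right_mod i (poolsProd ps) p.length
      have htail : unrank ps (i % poolsProd (p :: ps)) = unrank ps (i % poolsProd ps) := by
        rw [← hmod2]
        exact (unrank_mod ps hne' _).symm
      rw [hgetD, hdd]
      simp only [unrank]
      rw [hmod1, htail]
      simp

def capW : List (List String) → List Nat
  | [] => []
  | _ :: ps => min 50 (poolsProd ps) :: capW ps

theorem min_cap_mul (x l : Nat) : min 50 (min 50 x * l) = min 50 (x * l) := by
  rcases Nat.le_total x 50 with hx | hx
  · rcases Nat.lt_or_ge x 50 with h | h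
    · rw [Nat.min_eq_right (Nat.le_of_lt h)]
    · have : x = 50 := Nat.le_antisymm hx h
      subst this; rw [Nat.min_self]
  · rw [Nat.min_eq_left hx]
    rcases Nat.eq_zero_or_pos l with hl | hl
    · subst hl; simp
    · have h1 : 50 ≤ 50 * l := Nat.le_mul_of_pos_right 50 hl
      have h2 : 50 ≤ x * l := le_trans h1 (Nat.mul_le_mul_right l hx)
      rw [Nat.min_eq_left h1, Nat.min_eq_left h2]

theorem weights_fold (ps : List (List String)) :
    ps.reverse.foldl (fun (st : Nat × List Nat) pool =>
        (min 50 (st.1 * pool.length), st.2 ++ [st.1])) (1, ([] : List Nat))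
      = (min 50 (poolsProd ps), (capW ps).reverse) := by
  induction ps with
  | nil => simp [poolsProd_nil, capW]
  | cons p ps ih =>
      simp only [List.reverse_cons, List.foldl_append, ih, List.foldl_cons, List.foldl_nil]
      rw [Prod.mk.injEq]
      refine ⟨?_, by simp [capW]⟩
      rw [min_cap_mul, poolsProd_cons, Nat.mul_comm]

-- each digit only ever sees an index i < 50, so the capped weight extracts the same digit
theorem zip_capW_eq_unrank (ps : List (List String)) (i : Nat) (hi : i < 50) :
    ((ps.zip (capW ps)).map (fun pw => pw.1.getD ((i / pw.2) % pw.1.length) ""))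
      = unrank ps i := by
  induction ps with
  | nil => rfl
  | cons p ps ih =>
      simp only [capW, List.zip_cons_cons, List.map_cons, unrank, ih]
      congr 2
      rcases Nat.le_total (poolsProd ps) 50 with h | h
      · rw [Nat.min_eq_right h]
      · rw [Nat.min_eq_left h]
        rw [Nat.div_eq_of_lt hi, Nat.div_eq_of_lt (Nat.lt_of_lt_of_le hi h)]

theorem combos_nonempty (word : String) : ∀ p ∈ combosOf word, p ≠ [] := by
  have hvals : ∀ kv ∈ vowelRules.items, kv.2 ≠ [] := by decide
  rw [combosOf_eq_map]
  intro p hp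
  obtain ⟨s, _, rfl⟩ := List.mem_map.mp hp
  match s with
  | Sum.inr c => simp [poolOfSplit]
  | Sum.inl k =>
      simp only [poolOfSplit]
      cases hg : vowelRules.get? k with
      | some v => exact hvals (k, v) (PySem.Dict.mem_items_of_get?_eq_some _ hg)
      | none => simp

-- A's first-50 slice of the materialized product equals the unranked index range
theorem take_cart_eq_range (ps : List (List String)) (h : ∀ p ∈ ps, p ≠ []) :
    ((ps.foldl (fun r pool => r.flatMap (fun x => pool.map (fun y => x ++ [y]))) [[]]).take 50)
      = (List.range (min 50 (poolsProd ps))).map (fun i => unrank ps i) := by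
  have hlen : (ps.foldl (fun r pool => r.flatMap (fun x => pool.map (fun y => x ++ [y]))) [[]]).length = poolsProd ps := by
    rw [cart_length]; simp
  apply List.ext_getElem
  · simp [hlen, Nat.min_comm]
  · intro i h1 h2
    have hi : i < poolsProd ps := by
      simp [hlen] at h1; omega
    have hget := cart_get ps [[]] i h (by simpa using hi)
    have hdiv : i / poolsProd ps = 0 := Nat.div_eq_of_lt hi
    have hmod : i % poolsProd ps = i := Nat.mod_eq_of_lt hi
    rw [hdiv, hmod] at hget
    simp only [List.getElem_take]
    rw [List.getElem?_eq_getElem (by rw [hlen]; exact hi)] at hget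
    have hv := Option.some.inj hget
    rw [hv]
    simp

-- ===== VERDICT (by name: the statement is the Claim_ definition above) =====
theorem vowel_replace_spec : Claim_equal_vowel_replace := by
  intro word _
  unfold Spec_vowel_replace vowel_replace vowel_replace_alt
  simp only []
  have hne := combos_nonempty word
  have hpools : poolsB word.toList = combosOf word := by
    rw [poolsB_eq_combos, combosOf_eq_map]
  rw [hpools, weights_fold, take_cart_eq_range (combosOf word) hne, List.map_map]
  have hn : min 50 (min 50 (poolsProd (combosOf word)), (capW (combosOf word)).reverse).1
      = min 50 (poolsProd (combosOf word)) := by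
    simp only []
    omega
  rw [hn, List.reverse_reverse]
  apply List.map_congr_left
  intro i hi
  have hi50 : i < 50 := by
    have := List.mem_range.mp hi
    omega
  simp only [Function.comp]
  rw [zip_capW_eq_unrank (combosOf word) i hi50]
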